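-- pv_equiv track=rewrite | github.com/MinKyeom/KMK-DREAM | Programmers/Lv0/옹알이.py | solution
-- ===== SOURCE A (Python) =====
-- from itertools import permutations
--
-- def solution(babbling):
--     #
--     answer = 0
--     speak = ["aya", "ye", "woo", "ma"]
--     arr = []
--     for i in range(1, len(speak)+1):
--         for perm in permutations(speak, i):
--             arr.append("".join(list(perm)))
--
--     for b in babbling:
--         if b in arr:
--             answer+=1
--
--     return answer
-- ===== SOURCE B (Python) =====
-- def _accepts(b):
--     # greedy left-to-right parse: the four words start with distinct letters,
--     # so at each position at most one word can match -> parsing is deterministic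
--     avail = ["aya", "ye", "woo", "ma"]
--     rest = b
--     matched = False
--     progress = True
--     while progress:
--         progress = False
--         for w in avail:
--             if rest.startswith(w):
--                 rest = rest[len(w):]
--                 avail.remove(w)
--                 matched = True
--                 progress = True
--                 break
--     return rest == "" and matched
--
--
-- def solution(babbling):
--     return sum(1 for b in babbling if _accepts(b))
-- ===== Notes on version B (the rewrite author's own statement) =====
-- stated objective: alternative
-- what changed: Replaced the precomputed list of all 64 permutation-concatenations (then a linear membership scan per babbling) by a greedy left-to-right parser that consumes one unused word at a time, which is sound because the four words start with distinct letters.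
import Mathlib
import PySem

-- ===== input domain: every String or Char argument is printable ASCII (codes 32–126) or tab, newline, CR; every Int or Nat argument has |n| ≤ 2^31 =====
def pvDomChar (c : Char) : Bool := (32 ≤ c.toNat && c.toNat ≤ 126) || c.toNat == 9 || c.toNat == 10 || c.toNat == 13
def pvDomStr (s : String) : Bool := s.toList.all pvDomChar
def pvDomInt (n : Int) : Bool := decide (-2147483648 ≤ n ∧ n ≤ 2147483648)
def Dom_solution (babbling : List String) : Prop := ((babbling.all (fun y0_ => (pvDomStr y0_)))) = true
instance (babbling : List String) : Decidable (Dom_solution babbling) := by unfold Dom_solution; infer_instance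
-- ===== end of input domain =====

-- B replaces A's precomputed list of all 64 permutation-concatenations by a greedy
-- left-to-right parser (the four words start with distinct letters, so parsing is
-- deterministic); objective: alternative algorithm, similar cost on these tiny inputs.

-- ===== PORT A =====
-- itertools.permutations(pool, n) for a duplicate-free pool: pick each element in
-- pool order as head, recurse on the pool with it removed (exact for distinct pool).
def permsA : Nat → List String → List (List String)
  | 0, _ => [[]]
  | n + 1, pool => pool.flatMap (fun x => (permsA n (pool.erase x)).map (fun p => x :: p))

def speakA : List String := ["aya", "ye", "woo", "ma"]

-- arr: for i in range(1, len(speak)+1): for perm in permutations(speak, i): arr.append("".join(perm))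
def arrA : List String :=
  (PySem.List.pyRange 1 ((speakA.length : Int) + 1) 1).flatMap
    (fun i => (permsA i.toNat speakA).map (fun perm => perm.foldl (· ++ ·) ""))

def solution (babbling : List String) : Int :=
  babbling.foldl (fun answer b => if arrA.contains b then answer + 1 else answer) 0

-- ===== PORT B =====
-- one pass of B's inner for-loop: find the first available word that rest starts with;
-- returns (avail with that word removed, rest with it consumed), or none
def pickB : List String → List Char → Option (List String × List Char)
  | [], _ => none
  | w :: ws, rest =>
    if PySem.Chars.startswith rest w.toList then some (ws, rest.drop w.toList.length)
    else
      match pickB ws rest with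
      | some (ws', r) => some (w :: ws', r)
      | none => none

-- termination measure for loopB (cited by its decreasing_by)
theorem pickB_length_lt : ∀ (avail : List String) (rest : List Char) (p : List String × List Char),
    pickB avail rest = some p → p.1.length < avail.length := by
  intro avail
  induction avail with
  | nil => intro rest p h; simp [pickB] at h
  | cons w ws ih =>
    intro rest p h
    simp only [pickB] at h
    split at h
    · cases h; simp
    · cases hrec : pickB ws rest with
      | none => rw [hrec] at h; cases h
      | some q =>
        rw [hrec] at h; cases h
        have := ih rest q hrec
        simp; omega

-- B's while-loop: repeatedly consume one available word; matched records whether any matched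
def loopB (avail : List String) (rest : List Char) (matched : Bool) : Bool :=
  match h : pickB avail rest with
  | some (avail', rest') => loopB avail' rest' true
  | none => rest.isEmpty && matched
termination_by avail.length
decreasing_by exact pickB_length_lt _ _ _ h

def acceptsB (b : String) : Bool := loopB ["aya", "ye", "woo", "ma"] b.toList false

def solution_alt (babbling : List String) : Int := ((babbling.countP acceptsB : Nat) : Int)

-- ===== PRECONDITION & SPEC =====
def Spec_solution (babbling : List String) (out : Int) : Prop := out = solution_alt babbling
instance (babbling : List String) (out : Int) : Decidable (Spec_solution babbling out) := by unfold Spec_solution; infer_instance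

-- ===== CLAIM (what is proved, stated in full; the proofs are below) =====
def Claim_equal_solution : Prop := ∀ (babbling : List String), Dom_solution babbling → Spec_solution babbling (solution babbling)

-- ===== LEMMAS AND PROOFS =====

-- the four words are pairwise distinguished by their first character: two words of
-- speakA that are both prefixes of the same string are equal
theorem prefix_unique {w w' : String} (hw : w ∈ speakA) (hw' : w' ∈ speakA)
    {s : List Char} (h : w.toList <+: s) (h' : w'.toList <+: s) : w = w' := by
  have e1 : ("aya" : String).toList = ['a', 'y', 'a'] := by decide
  have e2 : ("ye" : String).toList = ['y', 'e'] := by decide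
  have e3 : ("woo" : String).toList = ['w', 'o', 'o'] := by decide
  have e4 : ("ma" : String).toList = ['m', 'a'] := by decide
  obtain ⟨t, ht⟩ := h
  obtain ⟨t', ht'⟩ := h'
  rw [← ht] at ht'
  fin_cases hw <;> fin_cases hw' <;> (try rfl) <;>
    (exfalso; simp only [e1, e2, e3, e4] at ht'; simp at ht')

theorem speak_ne_nil {w : String} (hw : w ∈ speakA) : w.toList ≠ [] := by
  fin_cases hw <;> decide

-- characterization of permsA on a duplicate-free pool
theorem mem_permsA {n : Nat} : ∀ {pool : List String}, pool.Nodup →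
    ∀ {p : List String}, (p ∈ permsA n pool ↔ p.length = n ∧ p.Nodup ∧ p ⊆ pool) := by
  induction n with
  | zero =>
    intro pool _ p
    simp [permsA, List.length_eq_zero_iff]
    rintro rfl; simp
  | succ n ih =>
    intro pool hpool p
    simp only [permsA, List.mem_flatMap, List.mem_map]
    constructor
    · rintro ⟨x, hx, q, hq, rfl⟩
      obtain ⟨hlen, hnd, hsub⟩ := (ih (hpool.erase x)).mp hq
      refine ⟨by simp [hlen], ?_, ?_⟩
      · refine List.nodup_cons.mpr ⟨fun hxq => ?_, hnd⟩
        exact ((hpool.mem_erase_iff).mp (hsub hxq)).1 rfl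
      · intro y hy
        rcases List.mem_cons.mp hy with rfl | hy
        · exact hx
        · exact (List.erase_subset) (hsub hy)
    · rintro ⟨hlen, hnd, hsub⟩
      cases p with
      | nil => simp at hlen
      | cons x q =>
        refine ⟨x, hsub (List.mem_cons_self), q, ?_, rfl⟩
        refine (ih (hpool.erase x)).mpr ⟨by simpa using hlen, (List.nodup_cons.mp hnd).2, ?_⟩
        intro y hy
        refine (hpool.mem_erase_iff).mpr ⟨?_, hsub (List.mem_cons_of_mem _ hy)⟩
        rintro rfl
        exact (List.nodup_cons.mp hnd).1 hy

theorem toList_foldl_append : ∀ (p : List String) (acc : String),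
    (p.foldl (· ++ ·) acc).toList = acc.toList ++ (p.map String.toList).flatten := by
  intro p
  induction p with
  | nil => simp
  | cons x q ih => intro acc; simp [ih, List.append_assoc]

-- membership in A's arr ↔ the string is the concatenation of a nonempty duplicate-free
-- sequence of words of speakA
theorem mem_arrA (s : String) :
    arrA.contains s = true ↔
      ∃ l : List String, l.Nodup ∧ l ⊆ speakA ∧ s.toList = (l.map String.toList).flatten ∧ l ≠ [] := by
  rw [List.contains_iff_mem]
  simp only [arrA, List.mem_flatMap, List.mem_map]
  constructor
  · rintro ⟨i, hi, p, hp, rfl⟩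
    rw [PySem.List.mem_pyRange_one] at hi
    obtain ⟨hlen, hnd, hsub⟩ := (mem_permsA (by decide)).mp hp
    refine ⟨p, hnd, hsub, by simpa using toList_foldl_append p "", ?_⟩
    rintro rfl
    simp at hlen
    omega
  · rintro ⟨l, hnd, hsub, hs, hne⟩
    refine ⟨(l.length : Int), ?_, l, ?_, ?_⟩
    · rw [PySem.List.mem_pyRange_one]
      have h1 : 1 ≤ l.length := List.length_pos_of_ne_nil hne
      have h4 : l.length ≤ 4 := by
        calc l.length = l.toFinset.card := (List.toFinset_card_of_nodup hnd).symm
          _ ≤ speakA.toFinset.card := Finset.card_le_card (fun x hx => by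
              simp only [List.mem_toFinset] at *; exact hsub hx)
          _ ≤ speakA.length := speakA.toFinset_card_le
        -- speakA.length = 4 definitionally
      simp [speakA] at h4 ⊢
      omega
    · exact (mem_permsA (by decide)).mpr ⟨by simp, hnd, hsub⟩
    · apply String.toList_inj.mp
      simpa [hs] using toList_foldl_append l ""

-- pickB soundness: a successful pick consumes one available word
theorem pickB_sound : ∀ (avail : List String) (rest : List Char) (a' : List String) (r' : List Char),
    pickB avail rest = some (a', r') →
    ∃ w, w ∈ avail ∧ rest = w.toList ++ r' ∧ a' = avail.erase w := by
  intro avail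
  induction avail with
  | nil => intro rest a' r' h; simp [pickB] at h
  | cons w ws ih =>
    intro rest a' r' h
    simp only [pickB] at h
    split at h
    · rename_i hpre
      obtain ⟨t, ht⟩ := (PySem.Chars.startswith_iff _ _).mp hpre
      cases h
      refine ⟨w, List.mem_cons_self, ?_, by simp⟩
      rw [← ht]
      simp
    · rename_i hpre
      cases hrec : pickB ws rest with
      | none => rw [hrec] at h; cases h
      | some q =>
        obtain ⟨ws', r⟩ := q
        rw [hrec] at h
        cases h
        obtain ⟨w', hw', hrest, ha⟩ := ih rest ws' r' hrec
        refine ⟨w', List.mem_cons_of_mem _ hw', hrest, ?_⟩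
        have hne : w ≠ w' := by
          rintro rfl
          exact hpre ((PySem.Chars.startswith_iff _ _).mpr ⟨r', hrest.symm⟩)
        rw [List.erase_cons_tail (by simp [hne]), ha]

-- pickB completeness: if some available word is a prefix, pickB finds (exactly) it
theorem pickB_complete : ∀ (avail : List String), avail ⊆ speakA →
    ∀ (w : String) (t : List Char), w ∈ avail →
    pickB avail (w.toList ++ t) = some (avail.erase w, t) := by
  intro avail
  induction avail with
  | nil => intro _ w t hw; simp at hw
  | cons x xs ih =>
    intro hsub w t hw
    simp only [pickB]
    by_cases hpre : PySem.Chars.startswith (w.toList ++ t) x.toList = true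
    · have hx : x = w :=
        prefix_unique (hsub List.mem_cons_self)
          (hsub (by exact hw))
          ((PySem.Chars.startswith_iff _ _).mp hpre) ⟨t, rfl⟩
      subst hx
      rw [if_pos hpre]
      simp
    · have hxw : x ≠ w := by
        rintro rfl
        exact hpre ((PySem.Chars.startswith_iff _ _).mpr ⟨t, rfl⟩)
      have hw' : w ∈ xs := by
        rcases List.mem_cons.mp hw with rfl | h
        · exact absurd rfl hxw
        · exact h
      rw [if_neg hpre, ih (fun y hy => hsub (List.mem_cons_of_mem _ hy)) w t hw',
          List.erase_cons_tail (by simp [hxw])]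

-- loop invariant: loopB accepts exactly the concatenations of duplicate-free sequences
-- of still-available words (nonempty unless matched already)
theorem loopB_iff : ∀ (n : Nat) (avail : List String), avail.length ≤ n → avail ⊆ speakA → avail.Nodup →
    ∀ (rest : List Char) (matched : Bool),
    (loopB avail rest matched = true ↔
      ∃ l : List String, l.Nodup ∧ l ⊆ avail ∧ rest = (l.map String.toList).flatten ∧
        (matched = true ∨ l ≠ [])) := by
  intro n
  induction n with
  | zero =>
    intro avail hlen hsub hnd rest matched
    have : avail = [] := List.eq_nil_of_length_eq_zero (by omega)
    subst this
    rw [loopB]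
    simp only [pickB]
    constructor
    · intro h
      have h1 : rest = [] ∧ matched = true := by
        constructor
        · exact List.isEmpty_iff.mp (Bool.and_elim_left h)
        · exact Bool.and_elim_right h
      exact ⟨[], by simp [h1.1, h1.2]⟩
    · rintro ⟨l, hnd', hsubl, hrest, hm⟩
      have : l = [] := List.eq_nil_iff_forall_not_mem.mpr (fun x hx => by simpa using hsubl hx)
      subst this
      rcases hm with hm | hm
      · simp [hrest, hm]
      · exact absurd rfl hm
  | succ n ih =>
    intro avail hlen hsub hnd rest matched
    rw [loopB]
    cases hpick : pickB avail rest with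
    | none =>
      simp only []
      constructor
      · intro h
        refine ⟨[], by simp, by simp, ?_, Or.inl (Bool.and_elim_right h)⟩
        simpa using (List.isEmpty_iff.mp (Bool.and_elim_left h)).symm
      · rintro ⟨l, hnd', hsubl, hrest, hm⟩
        cases l with
        | nil =>
          rcases hm with hm | hm
          · simp [hrest] at *; simp [hrest, hm]
          · exact absurd rfl hm
        | cons w l' =>
          exfalso
          have hw : w ∈ avail := hsubl List.mem_cons_self
          have := pickB_complete avail hsub w ((l'.map String.toList).flatten) hw
          rw [show rest = w.toList ++ (l'.map String.toList).flatten by simpa using hrest] at hpick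
          rw [this] at hpick
          cases hpick
    | some p =>
      obtain ⟨a', r'⟩ := p
      obtain ⟨w, hw, hrest, ha'⟩ := pickB_sound avail rest a' r' hpick
      have hsub' : a' ⊆ speakA := ha' ▸ fun x hx => hsub (List.erase_subset hx)
      have hnd' : a'.Nodup := ha' ▸ hnd.erase w
      have hlen' : a'.length ≤ n := by
        rw [ha', List.length_erase_of_mem hw]
        have := List.length_pos_of_mem hw
        omega
      rw [ih a' hlen' hsub' hnd' r' true]
      constructor
      · rintro ⟨l', hnd'', hsubl', hr', _⟩
        refine ⟨w :: l', ?_, ?_, ?_, Or.inr (by simp)⟩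
        · refine List.nodup_cons.mpr ⟨fun hc => ?_, hnd''⟩
          exact (hnd.mem_erase_iff.mp (ha' ▸ hsubl' hc)).1 rfl
        · intro y hy
          rcases List.mem_cons.mp hy with rfl | hy
          · exact hw
          · exact List.erase_subset (ha' ▸ hsubl' hy)
        · simp [hrest, hr']
      · rintro ⟨l, hndl, hsubl, hrl, _⟩
        cases l with
        | nil =>
          exfalso
          simp at hrl
          exact speak_ne_nil (hsub hw) (by
            have := hrest
            rw [hrl] at this
            exact (List.append_eq_nil_iff.mp this.symm).1)
        | cons w₁ l₁ =>
          have hw₁ : w₁ = w := by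
            refine prefix_unique (hsub (hsubl List.mem_cons_self)) (hsub hw) ?_ ⟨r', hrest.symm⟩
            exact ⟨(l₁.map String.toList).flatten, by simpa using hrl.symm⟩
          subst hw₁
          have hr' : r' = (l₁.map String.toList).flatten := by
            have : w₁.toList ++ r' = w₁.toList ++ (l₁.map String.toList).flatten := by
              rw [← hrest]; simpa using hrl
            exact List.append_cancel_left this
          refine ⟨l₁, (List.nodup_cons.mp hndl).2, ?_, hr', Or.inl rfl⟩
          intro y hy
          rw [ha']
          refine hnd.mem_erase_iff.mpr ⟨?_, hsubl (List.mem_cons_of_mem _ hy)⟩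
          rintro rfl
          exact (List.nodup_cons.mp hndl).1 hy

theorem acceptsB_iff (s : String) :
    acceptsB s = true ↔
      ∃ l : List String, l.Nodup ∧ l ⊆ speakA ∧ s.toList = (l.map String.toList).flatten ∧ l ≠ [] := by
  have h := loopB_iff 4 speakA (by decide) (fun x hx => hx) (by decide) s.toList false
  unfold acceptsB
  rw [show (["aya", "ye", "woo", "ma"] : List String) = speakA from rfl, h]
  constructor
  · rintro ⟨l, h1, h2, h3, h4⟩
    exact ⟨l, h1, h2, h3, h4.resolve_left (by simp)⟩
  · rintro ⟨l, h1, h2, h3, h4⟩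
    exact ⟨l, h1, h2, h3, Or.inr h4⟩

theorem contains_eq_accepts (b : String) : arrA.contains b = acceptsB b := by
  rcases hb : acceptsB b with _ | _
  · rcases hc : arrA.contains b with _ | _
    · rfl
    · exact absurd ((acceptsB_iff b).mpr ((mem_arrA b).mp hc)) (by simp [hb])
  · exact (mem_arrA b).mpr ((acceptsB_iff b).mp hb)

theorem foldl_count (p : String → Bool) : ∀ (l : List String) (n : Int),
    l.foldl (fun a b => if p b then a + 1 else a) n = n + ((l.countP p : Nat) : Int) := by
  intro l
  induction l with
  | nil => intro n; simp
  | cons x xs ih =>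
    intro n
    simp only [List.foldl_cons, List.countP_cons, ih]
    split <;> · push_cast; ring

-- ===== VERDICT (by name: the statement is the Claim_ definition above) =====
theorem solution_spec : Claim_equal_solution := by
  intro babbling _
  unfold Spec_solution solution solution_alt
  rw [foldl_count (fun b => arrA.contains b) babbling 0]
  have hc : List.countP (fun b => arrA.contains b) babbling = List.countP acceptsB babbling :=
    List.countP_congr (fun x _ => by
      show arrA.contains x = true ↔ acceptsB x = true
      rw [contains_eq_accepts x])
  rw [hc]
  simp
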